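-- pv_equiv track=rewrite | github.com/aywang71/PythonKattis | code/Demiliter Soup.py | findbar
-- ===== SOURCE A (Python) =====
-- def findbar(demiliter):
--   for i in range (0,len(demiliter)):
--     if demiliter[i] == '[':
--       for j in range (i+1,len(demiliter)):
--         if demiliter[j] == ' ':
--           continue
--         elif demiliter[j] == ']':
--           demiliter[i] = ' '
--           demiliter[j] = ' '
--           return demiliter, True
--         break
--   return demiliter, False
-- ===== SOURCE B (Python) =====
-- def findbar(demiliter):
--   pending = None
--   for i in range(len(demiliter)):
--     c = demiliter[i]
--     if c == ' ':
--       continue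
--     if c == ']' and pending is not None:
--       demiliter[pending] = ' '
--       demiliter[i] = ' '
--       return demiliter, True
--     pending = i if c == '[' else None
--   return demiliter, False
-- ===== Notes on version B (the rewrite author's own statement) =====
-- stated objective: alternative
-- what changed: Replaces the nested scan (for each '[' rescan forward over spaces) by a single left-to-right pass that tracks the index of a pending '[' whose following characters so far are all spaces.
import Mathlib
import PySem

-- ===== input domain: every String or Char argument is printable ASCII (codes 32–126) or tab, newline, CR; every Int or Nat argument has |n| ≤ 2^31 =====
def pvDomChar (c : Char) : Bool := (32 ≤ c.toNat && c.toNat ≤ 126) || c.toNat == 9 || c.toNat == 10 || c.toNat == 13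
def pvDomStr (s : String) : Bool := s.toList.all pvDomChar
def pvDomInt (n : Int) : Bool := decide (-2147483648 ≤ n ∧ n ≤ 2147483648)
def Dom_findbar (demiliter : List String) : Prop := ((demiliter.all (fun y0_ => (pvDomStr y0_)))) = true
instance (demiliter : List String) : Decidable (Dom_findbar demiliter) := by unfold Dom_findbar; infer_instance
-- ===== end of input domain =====

-- B replaces A's nested forward rescan by one pass tracking a pending '[' index (alternative
-- decomposition, same asymptotic cost). A mutates its argument in place; the equivalence proved
-- here is about the RETURN value only (B performs the same mutation in Python).

-- ===== PORT A =====
-- inner loop of A: scan j from given index; some r = 'return r', none = 'break'/loop end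
def findbarInner (l : List String) (p j : Nat) : Option (List String × Bool) :=
  if j < l.length then
    if l[j]! = " " then findbarInner l p (j+1)
    else if l[j]! = "]" then some ((l.set p " ").set j " ", true)
    else none
  else none
termination_by l.length - j

-- outer loop of A over i
def findbarOuter (l : List String) (i : Nat) : List String × Bool :=
  if i < l.length then
    if l[i]! = "[" then
      match findbarInner l i (i+1) with
      | some r => r
      | none => findbarOuter l (i+1)
    else findbarOuter l (i+1)
  else (l, false)
termination_by l.length - i

def findbar (demiliter : List String) : List String × Bool :=
  findbarOuter demiliter 0

-- ===== PORT B =====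
-- single pass: pending = index of the most recent '[' followed so far only by spaces
def findbarAltGo (l : List String) (i : Nat) (pending : Option Nat) : List String × Bool :=
  if i < l.length then
    if l[i]! = " " then findbarAltGo l (i+1) pending
    else
      match pending with
      | some p =>
        if l[i]! = "]" then ((l.set p " ").set i " ", true)
        else findbarAltGo l (i+1) (if l[i]! = "[" then some i else none)
      | none => findbarAltGo l (i+1) (if l[i]! = "[" then some i else none)
  else (l, false)
termination_by l.length - i

def findbar_alt (demiliter : List String) : List String × Bool :=
  findbarAltGo demiliter 0 none

-- ===== PRECONDITION & SPEC =====
def Spec_findbar (demiliter : List String) (out : List String × Bool) : Prop := out = findbar_alt demiliter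
instance (demiliter : List String) (out : List String × Bool) : Decidable (Spec_findbar demiliter out) := by unfold Spec_findbar; infer_instance

-- ===== CLAIM (what is proved, stated in full; the proofs are below) =====
def Claim_equal_findbar : Prop := ∀ (demiliter : List String), Dom_findbar demiliter → Spec_findbar demiliter (findbar demiliter)

-- ===== LEMMAS AND PROOFS =====

-- joint invariant: with no pending bracket B's pass equals A's outer loop; with pending p it
-- equals A's inner scan for p resumed at i, falling back to the outer loop on break/end.
theorem findbar_key (l : List String) :
    ∀ n i, l.length ≤ i + n →
      (findbarAltGo l i none = findbarOuter l i) ∧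
      (∀ p, findbarAltGo l i (some p) =
        match findbarInner l p i with
        | some r => r
        | none => findbarOuter l i) := by
  intro n
  induction n with
  | zero =>
    intro i hi
    have hni : ¬ i < l.length := by omega
    constructor
    · rw [findbarAltGo, findbarOuter]; simp [hni]
    · intro p; rw [findbarAltGo, findbarInner, findbarOuter]; simp [hni]
  | succ n ih =>
    intro i hi
    by_cases hlt : i < l.length
    · have ih' := ih (i+1) (by omega)
      constructor
      · rw [findbarAltGo, findbarOuter]
        by_cases hsp : l[i]'hlt = " "
        · simp [hlt, hsp]; exact ih'.1
        · by_cases hbr : l[i]'hlt = "["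
          · simp [hlt, hbr]; rw [ih'.2 i]
          · simp [hlt, hsp, hbr]; exact ih'.1
      · intro p
        rw [findbarAltGo, findbarInner]
        by_cases hsp : l[i]'hlt = " "
        · simp [hlt, hsp]
          rw [ih'.2 p]
          conv_rhs => rw [findbarOuter]
          simp [hlt, hsp]
        · by_cases hcl : l[i]'hlt = "]"
          · simp [hlt, hcl]
          · by_cases hbr : l[i]'hlt = "["
            · simp [hlt, hbr]
              rw [ih'.2 i]
              conv_rhs => rw [findbarOuter]
              simp [hlt, hbr]
            · simp [hlt, hsp, hcl, hbr]
              rw [ih'.1]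
              conv_rhs => rw [findbarOuter]
              simp [hlt, hbr]
    · constructor
      · rw [findbarAltGo, findbarOuter]; simp [hlt]
      · intro p; rw [findbarAltGo, findbarInner, findbarOuter]; simp [hlt]

-- ===== VERDICT (by name: the statement is the Claim_ definition above) =====
theorem findbar_spec : Claim_equal_findbar := by
  intro l _
  unfold Spec_findbar findbar findbar_alt
  exact ((findbar_key l l.length 0 (by omega)).1).symm
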